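-- pv_equiv track=rewrite | github.com/mance-cyber/GGJ_hktvmall_mms | backend/app/core/url_security.py | is_domain_allowed
-- ===== SOURCE A (Python) =====
-- from typing import Optional, List, Tuple
--
-- ALLOWED_DOMAINS: List[str] = [
--     # HKTVmall
--     "hktvmall.com",
--     "www.hktvmall.com",
--     # Watsons
--     "watsons.com.hk",
--     "www.watsons.com.hk",
--     # Mannings
--     "mannings.com.hk",
--     "www.mannings.com.hk",
--     # PARKnSHOP
--     "parknshop.com",
--     "www.parknshop.com",
--     # Wellcome
--     "wellcome.com.hk",
--     "www.wellcome.com.hk",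
--     # JD
--     "jd.hk",
--     "www.jd.hk",
--     "jd.com",
--     "www.jd.com",
--     # Taobao / Tmall
--     "taobao.com",
--     "world.taobao.com",
--     "tmall.com",
--     "tmall.hk",
--     # Amazon
--     "amazon.com",
--     "www.amazon.com",
--     "amazon.co.jp",
--     "www.amazon.co.jp",
--     # Sasa
--     "sasa.com",
--     "www.sasa.com",
--     # 其他可以動態添加的平台
-- ]
--
-- def is_domain_allowed(domain: str, extra_allowed: List[str] = None) -> bool:
--     """
--     檢查域名是否在白名單中
--
--     Args:
--         domain: 要檢查的域名
--         extra_allowed: 額外允許的域名列表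
--
--     Returns:
--         True 如果域名被允許
--     """
--     domain = domain.lower().strip()
--     allowed = ALLOWED_DOMAINS.copy()
--
--     if extra_allowed:
--         allowed.extend(extra_allowed)
--
--     for allowed_domain in allowed:
--         if domain == allowed_domain or domain.endswith("." + allowed_domain):
--             return True
--
--     return False
-- ===== SOURCE B (Python) =====
-- from typing import List
--
-- ALLOWED_DOMAINS: List[str] = [
--     "hktvmall.com", "www.hktvmall.com",
--     "watsons.com.hk", "www.watsons.com.hk",
--     "mannings.com.hk", "www.mannings.com.hk",
--     "parknshop.com", "www.parknshop.com",
--     "wellcome.com.hk", "www.wellcome.com.hk",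
--     "jd.hk", "www.jd.hk", "jd.com", "www.jd.com",
--     "taobao.com", "world.taobao.com", "tmall.com", "tmall.hk",
--     "amazon.com", "www.amazon.com", "amazon.co.jp", "www.amazon.co.jp",
--     "sasa.com", "www.sasa.com",
-- ]
--
-- def is_domain_allowed(domain: str, extra_allowed: List[str] = None) -> bool:
--     allowed = set(ALLOWED_DOMAINS) | set(extra_allowed or [])
--     d = domain.lower().strip()
--     candidates = [d]
--     for i, ch in enumerate(d):
--         if ch == '.':
--             candidates.append(d[i + 1:])
--     return any(c in allowed for c in candidates)
-- ===== Notes on version B (the rewrite author's own statement) =====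
-- stated objective: idiomatic
-- what changed: Replaces the linear scan of the whitelist with endswith tests by a precomputed set of allowed domains and one pass over the input that generates its dot-suffix candidates, each checked with an O(1) set lookup.
import Mathlib
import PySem

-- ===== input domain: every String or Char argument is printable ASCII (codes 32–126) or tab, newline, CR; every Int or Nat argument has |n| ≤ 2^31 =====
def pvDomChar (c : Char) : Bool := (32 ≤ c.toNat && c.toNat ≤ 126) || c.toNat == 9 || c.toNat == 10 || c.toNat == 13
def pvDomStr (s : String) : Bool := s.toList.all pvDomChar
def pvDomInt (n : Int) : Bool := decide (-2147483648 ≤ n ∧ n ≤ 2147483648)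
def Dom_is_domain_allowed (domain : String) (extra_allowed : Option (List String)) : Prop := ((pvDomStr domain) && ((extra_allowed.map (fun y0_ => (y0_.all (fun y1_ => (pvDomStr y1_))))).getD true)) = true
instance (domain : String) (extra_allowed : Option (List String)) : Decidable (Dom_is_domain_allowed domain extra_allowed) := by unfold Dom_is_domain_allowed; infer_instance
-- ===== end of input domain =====

-- B replaces A's scan of the whitelist (with an endswith test per entry) by a set of
-- allowed domains plus one pass generating the domain's dot-suffix candidates (idiomatic).

-- ===== PORT A =====
def allowedDomains : List String :=
  ["hktvmall.com", "www.hktvmall.com",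
   "watsons.com.hk", "www.watsons.com.hk",
   "mannings.com.hk", "www.mannings.com.hk",
   "parknshop.com", "www.parknshop.com",
   "wellcome.com.hk", "www.wellcome.com.hk",
   "jd.hk", "www.jd.hk", "jd.com", "www.jd.com",
   "taobao.com", "world.taobao.com", "tmall.com", "tmall.hk",
   "amazon.com", "www.amazon.com", "amazon.co.jp", "www.amazon.co.jp",
   "sasa.com", "www.sasa.com"]

def is_domain_allowed (domain : String) (extra_allowed : Option (List String)) : Bool :=
  let d := PySem.Str.strip (PySem.Str.lower domain)
  -- `if extra_allowed:` — extend only when extra_allowed is a non-empty list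
  let allowed := allowedDomains ++
    (match extra_allowed with
     | some l => if l.isEmpty then [] else l
     | none => [])
  -- `for allowed_domain in allowed: if …: return True` / `return False`
  allowed.any (fun a => d == a || PySem.Str.endswith d ("." ++ a))

-- ===== PORT B =====
-- candidates appended by Source B's loop: for each position holding '.', the suffix after it
def suffixCandidates : List Char → List (List Char)
  | [] => []
  | c :: rest => (if c = '.' then [rest] else []) ++ suffixCandidates rest

def is_domain_allowed_alt (domain : String) (extra_allowed : Option (List String)) : Bool :=
  let allowed : PySem.Set String :=
    PySem.Set.union (PySem.Set.ofList allowedDomains)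
      (PySem.Set.ofList (extra_allowed.getD []))   -- set(ALLOWED_DOMAINS) | set(extra_allowed or [])
  let d := PySem.Str.strip (PySem.Str.lower domain)
  let candidates := d.toList :: suffixCandidates d.toList
  candidates.any (fun c => PySem.Set.contains allowed (String.ofList c))

-- ===== PRECONDITION & SPEC =====
def Spec_is_domain_allowed (domain : String) (extra_allowed : Option (List String)) (out : Bool) : Prop := out = is_domain_allowed_alt domain extra_allowed
instance (domain : String) (extra_allowed : Option (List String)) (out : Bool) : Decidable (Spec_is_domain_allowed domain extra_allowed out) := by unfold Spec_is_domain_allowed; infer_instance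

-- ===== CLAIM (what is proved, stated in full; the proofs are below) =====
def Claim_equal_is_domain_allowed : Prop := ∀ (domain : String) (extra_allowed : Option (List String)), Dom_is_domain_allowed domain extra_allowed → Spec_is_domain_allowed domain extra_allowed (is_domain_allowed domain extra_allowed)

-- ===== LEMMAS AND PROOFS =====

-- a list is a dot-suffix candidate iff '.'-prefixed it is a suffix of the domain's chars
theorem mem_suffixCandidates (c : List Char) : ∀ (L : List Char),
    c ∈ suffixCandidates L ↔ ('.' :: c) <:+ L := by
  intro L
  induction L with
  | nil => simp [suffixCandidates]
  | cons x rest ih =>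
      rw [List.suffix_cons_iff]
      simp only [suffixCandidates, List.mem_append]
      constructor
      · rintro (h | h)
        · split_ifs at h with hx
          · simp only [List.mem_singleton] at h; subst h hx; exact Or.inl rfl
          · simp at h
        · exact Or.inr (ih.mp h)
      · rintro (h | h)
        · rcases List.cons_eq_cons.mp h with ⟨h1, h2⟩
          subst h1; subst h2; simp
        · exact Or.inr (ih.mpr h)

-- core equivalence for any concrete list E of extra domains
theorem main_equiv (d : String) (E : List String) :
    ((allowedDomains ++ E).any fun a => d == a || PySem.Str.endswith d ("." ++ a)) =
    ((d.toList :: suffixCandidates d.toList).any fun c =>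
      ((PySem.Set.ofList allowedDomains).union (PySem.Set.ofList E)).contains (String.ofList c)) := by
  rw [Bool.eq_iff_iff]
  simp only [List.any_eq_true, List.mem_cons, Bool.or_eq_true, beq_iff_eq,
    PySem.Set.contains_iff]
  constructor
  · rintro ⟨a, ha, hmatch⟩
    refine ⟨a.toList, ?_, ?_⟩
    · rcases hmatch with h | h
      · left; rw [h]
      · right
        rw [mem_suffixCandidates]
        rw [PySem.Str.endswith_eq, PySem.Chars.endswith_iff] at h
        have h2 : ("." ++ a).toList <:+ d.toList := by simpa using h
        simpa [String.toList_append] using h2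
    · have h3 : a ∈ allowedDomains ∨ a ∈ E := List.mem_append.mp ha
      rw [String.ofList_toList, PySem.Set.mem_union, PySem.Set.mem_ofList, PySem.Set.mem_ofList]
      exact h3
  · rintro ⟨c, hc, hmem⟩
    have hmem' : String.ofList c ∈ allowedDomains ++ E := by
      apply List.mem_append.mpr
      rw [PySem.Set.mem_union, PySem.Set.mem_ofList, PySem.Set.mem_ofList] at hmem
      exact hmem
    refine ⟨String.ofList c, hmem', ?_⟩
    rcases hc with h | h
    · subst h; left; exact String.ofList_toList.symm
    · rw [mem_suffixCandidates] at h
      right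
      have h2 : ("." ++ String.ofList c).toList <:+ d.toList := by
        simpa [String.toList_append] using h
      rw [PySem.Str.endswith_eq, PySem.Chars.endswith_iff]
      simpa using h2

-- ===== VERDICT (by name: the statement is the Claim_ definition above) =====
theorem is_domain_allowed_spec : Claim_equal_is_domain_allowed := by
  intro domain extra_allowed _
  unfold Spec_is_domain_allowed is_domain_allowed is_domain_allowed_alt
  cases extra_allowed with
  | none => exact main_equiv _ []
  | some l =>
      cases l with
      | nil => exact main_equiv _ []
      | cons x xs =>
          simpa using main_equiv (PySem.Str.strip (PySem.Str.lower domain)) (x :: xs)
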